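-- pv_equiv track=rewrite | github.com/epiqc/qutrits | cirq/qutrit/plus_k_gate.py | _can_make_enough_ancilla
-- ===== SOURCE A (Python) =====
-- def _can_make_enough_ancilla(k, carry_in=False, carry_ancilla=None):
--     if carry_in and carry_ancilla is None:
--         return False
--     if carry_in and not k[0]:
--         k = list(k)
--         k[0] = True
--
--     one_group = 0
--     free_count = 0
--     input_count = 0
--     last_zero_k_i = max((-k_i, i) for i, k_i in enumerate(k))[1]
--     if k[last_zero_k_i]: last_zero_k_i = -1
--     for k_i in k[:last_zero_k_i+1]:
--         if k_i:
--             one_group += 1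
--         elif one_group > 0:
--             if one_group > 5:
--                 free_count += one_group - 5
--             if one_group <= 3:
--                 input_count += 1
--             one_group = 0
--
--         if not k_i:
--             free_count += 1
--     n_trailing_ones = len(k) - (last_zero_k_i+1)
--     if n_trailing_ones > 1:
--         input_count += 1
--         free_count += n_trailing_ones - 1
--     ancilla_count = free_count // 3
--
--     if ancilla_count == 0:
--         return input_count == 0
--     return (input_count + ancilla_count - 1) // ancilla_count <= 4
-- ===== SOURCE B (Python) =====
-- def _can_make_enough_ancilla(k, carry_in=False, carry_ancilla=None):
--     if carry_in and carry_ancilla is None: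
--         return False
--     ks = list(k)
--     if carry_in and not ks[0]:
--         ks[0] = True
--
--     # positions of all falsy entries; gaps between consecutive falsy positions
--     # (with a virtual one at -1) are exactly the lengths of the one-groups
--     zeros = [i for i, v in enumerate(ks) if not v]
--     if zeros:
--         gaps = [j - i - 1 for i, j in zip([-1] + zeros, zeros)]
--         free = len(zeros) + sum(g - 5 for g in gaps if g > 5)
--         inputs = sum(1 for g in gaps if 1 <= g <= 3)
--         trailing = len(ks) - 1 - zeros[-1]
--     else:
--         free = 0
--         inputs = 0
--         trailing = len(ks)
--
--     if trailing > 1: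
--         inputs += 1
--         free += trailing - 1
--
--     anc = free // 3
--     if anc == 0:
--         return inputs == 0
--     return (inputs + anc - 1) // anc <= 4
-- ===== Notes on version B (the rewrite author's own statement) =====
-- stated objective: alternative
-- what changed: Instead of A's stateful left-to-right scan (tuple-max index search plus a one_group counter mutated per element), B collects the index positions of all falsy entries and derives the one-group lengths as differences of consecutive zero positions (with a virtual zero at -1), aggregating free/input counts over that gap list; the trailing-ones count falls out of the last zero position.
import Mathlib
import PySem

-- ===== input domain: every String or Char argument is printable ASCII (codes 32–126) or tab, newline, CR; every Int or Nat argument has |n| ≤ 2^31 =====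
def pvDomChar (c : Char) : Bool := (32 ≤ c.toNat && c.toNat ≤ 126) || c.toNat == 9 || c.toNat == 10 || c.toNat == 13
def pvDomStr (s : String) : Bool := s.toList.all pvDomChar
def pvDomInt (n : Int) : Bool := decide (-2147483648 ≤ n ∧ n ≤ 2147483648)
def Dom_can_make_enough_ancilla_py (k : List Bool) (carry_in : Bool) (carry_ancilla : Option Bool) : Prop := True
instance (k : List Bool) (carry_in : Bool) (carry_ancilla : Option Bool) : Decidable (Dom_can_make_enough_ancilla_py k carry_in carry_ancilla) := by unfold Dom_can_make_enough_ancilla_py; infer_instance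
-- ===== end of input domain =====

-- B replaces A's stateful one_group scan (with a tuple-max index search) by collecting the index
-- positions of all falsy entries and aggregating over the gap list of consecutive zero positions
-- (objective: alternative decomposition, same O(n) cost).

-- ===== PORT A =====
-- Python's max over (−k_i, i) tuples: a running lexicographic max keeping the first maximal element
def pvAMaxPair (x : Int × Int) (xs : List (Int × Int)) : Int × Int :=
  xs.foldl (fun b y => if b.1 < y.1 || (b.1 == y.1 && b.2 < y.2) then y else b) x

def pvAPairs (k : List Bool) : List (Int × Int) :=
  (PySem.List.enumerate k 0).map (fun p => ((if p.2 then (-1 : Int) else 0), p.1))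

-- max((-k_i, i) for i, k_i in enumerate(k)); on [] Python's max raises ValueError —
-- excluded by Pre_, so the [] branch value is arbitrary
def pvAMaxOf (k : List Bool) : Int × Int :=
  match pvAPairs k with
  | [] => (-1, -1)
  | p :: ps => pvAMaxPair p ps

-- last_zero_k_i = max(...)[1]; then reset to -1 if k[last_zero_k_i]
def pvALastZero (k : List Bool) : Int :=
  if (PySem.List.pyGet? k (pvAMaxOf k).2).getD false then -1 else (pvAMaxOf k).2

-- one iteration of A's for-loop over (one_group, free_count, input_count)
def pvAStep (s : Int × Int × Int) (ki : Bool) : Int × Int × Int :=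
  let og := s.1
  let fc := s.2.1
  let ic := s.2.2
  let t : Int × Int × Int :=
    if ki then (og + 1, fc, ic)
    else if og > 0 then
      (0, fc + (if og > 5 then og - 5 else 0), ic + (if og ≤ 3 then 1 else 0))
    else (og, fc, ic)
  if !ki then (t.1, t.2.1 + 1, t.2.2) else t

def pvACore (k : List Bool) : Bool :=
  let last0 := pvALastZero k
  let s := (PySem.List.slice k (some 0) (some (last0 + 1))).foldl pvAStep (0, 0, 0)
  let free_count := s.2.1
  let input_count := s.2.2
  let n_trailing : Int := (k.length : Int) - (last0 + 1)
  let fi : Int × Int :=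
    if n_trailing > 1 then (input_count + 1, free_count + (n_trailing - 1))
    else (input_count, free_count)
  let ancilla := PySem.Int.floordiv fi.2 3
  if ancilla == 0 then fi.1 == 0
  else decide (PySem.Int.floordiv (fi.1 + ancilla - 1) ancilla ≤ 4)

def can_make_enough_ancilla_py (k : List Bool) (carry_in : Bool) (carry_ancilla : Option Bool) : Bool :=
  if carry_in && carry_ancilla.isNone then false
  else
    pvACore
      (if carry_in && !((PySem.List.pyGet? k 0).getD true) then
        (match k with | [] => [] | _ :: t => true :: t)
       else k)

-- ===== PORT B =====
-- zeros = [i for i, v in enumerate(ks) if not v]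
def pvZeros (ks : List Bool) : List Int :=
  ((PySem.List.enumerate ks 0).filter (fun p => !p.2)).map (fun p => p.1)

-- gaps = [j - i - 1 for i, j in zip([-1] + zeros, zeros)]
def pvGaps (zeros : List Int) : List Int :=
  (List.zip ((-1 : Int) :: zeros) zeros).map (fun p => p.2 - p.1 - 1)

-- sum(g - 5 for g in gaps if g > 5)
def pvExcessSum (gaps : List Int) : Int :=
  ((gaps.filter (fun g => decide (5 < g))).map (fun g => g - 5)).sum

-- sum(1 for g in gaps if 1 <= g <= 3)
def pvCnt13 (gaps : List Int) : Int :=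
  ((gaps.filter (fun g => decide (1 ≤ g ∧ g ≤ 3))).length : Int)

def pvBCore (ks : List Bool) : Bool :=
  let zeros := pvZeros ks
  let fit : Int × Int × Int :=
    match zeros.getLast? with
    | some lz =>
        let gaps := pvGaps zeros
        ((zeros.length : Int) + pvExcessSum gaps, pvCnt13 gaps, (ks.length : Int) - 1 - lz)
    | none => (0, 0, (ks.length : Int))
  let fi : Int × Int :=
    if fit.2.2 > 1 then (fit.2.1 + 1, fit.1 + (fit.2.2 - 1)) else (fit.2.1, fit.1)
  let anc := PySem.Int.floordiv fi.2 3
  if anc == 0 then fi.1 == 0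
  else decide (PySem.Int.floordiv (fi.1 + anc - 1) anc ≤ 4)

def can_make_enough_ancilla_py_alt (k : List Bool) (carry_in : Bool) (carry_ancilla : Option Bool) : Bool :=
  if carry_in && carry_ancilla.isNone then false
  else
    pvBCore
      (if carry_in && !((PySem.List.pyGet? k 0).getD true) then
        (match k with | [] => [] | _ :: t => true :: t)
       else k)

-- ===== PRECONDITION & SPEC =====
-- Pre_ excludes exactly the inputs on which Python A raises: empty k, unless the
-- carry_in-without-carry_ancilla early return fires first (there A raises ValueError at max(...)
-- or IndexError at k[0]).
def Pre_can_make_enough_ancilla_py (k : List Bool) (carry_in : Bool) (carry_ancilla : Option Bool) : Prop :=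
  k ≠ [] ∨ (carry_in = true ∧ carry_ancilla = none)
instance (k : List Bool) (carry_in : Bool) (carry_ancilla : Option Bool) : Decidable (Pre_can_make_enough_ancilla_py k carry_in carry_ancilla) := by unfold Pre_can_make_enough_ancilla_py; infer_instance

def pvWitness_can_make_enough_ancilla_py : List Bool × Bool × Option Bool := ([false, true], false, none)

def Spec_can_make_enough_ancilla_py (k : List Bool) (carry_in : Bool) (carry_ancilla : Option Bool) (out : Bool) : Prop := out = can_make_enough_ancilla_py_alt k carry_in carry_ancilla
instance (k : List Bool) (carry_in : Bool) (carry_ancilla : Option Bool) (out : Bool) : Decidable (Spec_can_make_enough_ancilla_py k carry_in carry_ancilla out) := by unfold Spec_can_make_enough_ancilla_py; infer_instance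

-- ===== CLAIM (what is proved, stated in full; the proofs are below) =====
def Claim_equal_can_make_enough_ancilla_py : Prop := ∀ (k : List Bool) (carry_in : Bool) (carry_ancilla : Option Bool), Dom_can_make_enough_ancilla_py k carry_in carry_ancilla → Pre_can_make_enough_ancilla_py k carry_in carry_ancilla → Spec_can_make_enough_ancilla_py k carry_in carry_ancilla (can_make_enough_ancilla_py k carry_in carry_ancilla)


-- ===== LEMMAS AND PROOFS =====

-- B's last zero index: last index whose value is falsy, or -1 (proof-side characterisation)
def pvBLastZero (ks : List Bool) : Int :=
  (PySem.List.enumerate ks 0).foldl (fun acc p => if !p.2 then p.1 else acc) (-1 : Int)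

theorem pvBLastZero_snoc (l : List Bool) (x : Bool) :
    pvBLastZero (l ++ [x]) = if x then pvBLastZero l else (l.length : Int) := by
  unfold pvBLastZero
  rw [PySem.List.enumerate_append, List.foldl_append]
  simp [PySem.List.enumerate]
  cases x <;> simp

theorem pvBLastZero_snoc_true (l : List Bool) : pvBLastZero (l ++ [true]) = pvBLastZero l := by
  rw [pvBLastZero_snoc]; rfl

theorem pvBLastZero_snoc_false (l : List Bool) : pvBLastZero (l ++ [false]) = (l.length : Int) := by
  rw [pvBLastZero_snoc]; rfl

theorem pvAPairs_snoc (l : List Bool) (x : Bool) :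
    pvAPairs (l ++ [x]) = pvAPairs l ++ [((if x then (-1:Int) else 0), (l.length : Int))] := by
  unfold pvAPairs
  rw [PySem.List.enumerate_append]
  simp [PySem.List.enumerate_cons, PySem.List.enumerate_nil]

theorem pvAPairs_ne_nil (l : List Bool) (h : l ≠ []) : pvAPairs l ≠ [] := by
  cases l with
  | nil => exact absurd rfl h
  | cons a t => simp [pvAPairs, PySem.List.enumerate_cons]

theorem pvAMaxOf_snoc (l : List Bool) (x : Bool) (h : l ≠ []) :
    pvAMaxOf (l ++ [x]) =
      (if (pvAMaxOf l).1 < (if x then (-1:Int) else 0) ||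
          ((pvAMaxOf l).1 == (if x then (-1:Int) else 0) && (pvAMaxOf l).2 < (l.length:Int))
       then ((if x then (-1:Int) else 0), (l.length:Int)) else pvAMaxOf l) := by
  obtain ⟨p, ps, hp⟩ : ∃ p ps, pvAPairs l = p :: ps := by
    cases hl : pvAPairs l with
    | nil => exact absurd hl (pvAPairs_ne_nil l h)
    | cons p ps => exact ⟨p, ps, rfl⟩
  unfold pvAMaxOf
  rw [pvAPairs_snoc, hp]
  simp [pvAMaxPair, List.foldl_append]

theorem pyGet?_append_left_of {α : Type} (l m : List α) (i : Int) (h0 : 0 ≤ i)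
    (h1 : i < (l.length : Int)) : PySem.List.pyGet? (l ++ m) i = PySem.List.pyGet? l i := by
  rw [PySem.List.pyGet?_of_nonneg (l ++ m) h0, PySem.List.pyGet?_of_nonneg l h0]
  rw [List.getElem?_append_left (by omega)]

-- combined characterisation of A's max-of-pairs against the last-False scan
theorem pvMax_char (ks : List Bool) (h : ks ≠ []) :
    (if false ∈ ks then
        pvAMaxOf ks = (0, pvBLastZero ks)
        ∧ 0 ≤ pvBLastZero ks ∧ pvBLastZero ks < (ks.length : Int)
        ∧ PySem.List.pyGet? ks (pvBLastZero ks) = some false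
      else
        pvAMaxOf ks = (-1, (ks.length : Int) - 1)
        ∧ pvBLastZero ks = -1
        ∧ PySem.List.pyGet? ks ((ks.length : Int) - 1) = some true) := by
  induction ks using List.reverseRecOn with
  | nil => exact absurd rfl h
  | append_singleton l x ih =>
    rcases eq_or_ne l [] with rfl | hl
    · cases x <;> decide
    · have ihh := ih hl
      have hlen : (0:Int) < (l.length : Int) := by
        cases l with | nil => exact absurd rfl hl | cons a t => simp
      rw [pvAMaxOf_snoc l x hl]
      by_cases hf : false ∈ l
      · rw [if_pos hf] at ihh
        obtain ⟨hm, h0, hlt, hget⟩ := ihh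
        cases x with
        | false =>
          rw [if_pos (by simp), pvBLastZero_snoc_false, hm]
          refine ⟨by simp [hlt], by omega, by simp, ?_⟩
          simpa using PySem.List.pyGet?_append_length l false []
        | true =>
          rw [if_pos (by simp [hf]), pvBLastZero_snoc_true, hm]
          refine ⟨by simp, h0, by simp; omega, ?_⟩
          rw [pyGet?_append_left_of l [true] _ h0 hlt]; exact hget
      · rw [if_neg hf] at ihh
        obtain ⟨hm, hb, hget⟩ := ihh
        cases x with
        | false =>
          rw [if_pos (by simp), pvBLastZero_snoc_false, hm]
          refine ⟨by simp, by omega, by simp, ?_⟩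
          simpa using PySem.List.pyGet?_append_length l false []
        | true =>
          rw [if_neg (by simp [hf]), pvBLastZero_snoc_true, hm]
          have hc : (l.length:Int) - 1 < (l.length:Int) := by omega
          refine ⟨by simp [hc], hb, ?_⟩
          have h2 : ((l ++ [true]).length : Int) - 1 = (l.length : Int) := by simp
          rw [h2]
          simpa using PySem.List.pyGet?_append_length l true []

theorem pvALastZero_eq (ks : List Bool) : pvALastZero ks = pvBLastZero ks := by
  cases hne : ks with
  | nil => rfl
  | cons a t =>
    rw [← hne]
    have h := pvMax_char ks (by rw [hne]; simp)
    unfold pvALastZero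
    by_cases hf : false ∈ ks
    · rw [if_pos hf] at h
      obtain ⟨hm, h0, hlt, hget⟩ := h
      rw [hm]
      simp [hget]
    · rw [if_neg hf] at h
      obtain ⟨hm, hb, hget⟩ := h
      rw [hm]
      simp [hget, hb]

-- recursive form of the gap list (for snoc induction)
def pvGapsAux (p : Int) : List Int → List Int
  | [] => []
  | z :: zs => (z - p - 1) :: pvGapsAux z zs

theorem pvGaps_eq_aux_gen (zs : List Int) : ∀ p : Int,
    (List.zip (p :: zs) zs).map (fun q => q.2 - q.1 - 1) = pvGapsAux p zs := by
  induction zs with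
  | nil => intro p; rfl
  | cons z zs ih => intro p; simp [pvGapsAux, ← ih z]

theorem pvGaps_def (zs : List Int) : pvGaps zs = pvGapsAux (-1) zs := by
  unfold pvGaps; exact pvGaps_eq_aux_gen zs (-1)

theorem pvGapsAux_snoc (zs : List Int) : ∀ (p n : Int),
    pvGapsAux p (zs ++ [n]) = pvGapsAux p zs ++ [n - zs.getLast?.getD p - 1] := by
  induction zs with
  | nil => intro p n; rfl
  | cons z zs ih =>
    intro p n
    simp only [List.cons_append, pvGapsAux, ih z]
    cases zs with
    | nil => rfl
    | cons a t =>
      obtain ⟨y, hy⟩ := Option.isSome_iff_exists.mp (by simp : (a :: t).getLast?.isSome)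
      simp [List.getLast?_cons_cons, hy]

theorem pvZeros_snoc (l : List Bool) (x : Bool) :
    pvZeros (l ++ [x]) = pvZeros l ++ (if x then [] else [(l.length : Int)]) := by
  unfold pvZeros
  rw [PySem.List.enumerate_append]
  cases x <;> simp [PySem.List.enumerate_cons, PySem.List.enumerate_nil]

theorem pvZerosLast (l : List Bool) : (pvZeros l).getLast?.getD (-1) = pvBLastZero l := by
  induction l using List.reverseRecOn with
  | nil => rfl
  | append_singleton l x ih =>
    cases x with
    | true => rw [pvZeros_snoc, pvBLastZero_snoc_true]; simpa using ih
    | false => rw [pvZeros_snoc, pvBLastZero_snoc_false]; simp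

theorem pvBLastZero_bounds (l : List Bool) :
    -1 ≤ pvBLastZero l ∧ pvBLastZero l < (l.length : Int) := by
  induction l using List.reverseRecOn with
  | nil => decide
  | append_singleton l x ih =>
    cases x with
    | true =>
      rw [pvBLastZero_snoc_true]
      obtain ⟨h1, h2⟩ := ih
      constructor
      · exact h1
      · simp only [List.length_append, List.length_cons, List.length_nil]
        push_cast; omega
    | false =>
      rw [pvBLastZero_snoc_false]
      constructor
      · omega
      · simp only [List.length_append, List.length_cons, List.length_nil]
        push_cast; omega

theorem pvExcessSum_snoc (gs : List Int) (g : Int) :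
    pvExcessSum (gs ++ [g]) = pvExcessSum gs + (if g > 5 then g - 5 else 0) := by
  by_cases h : 5 < g <;> simp [pvExcessSum, List.filter_append, List.filter, h]

theorem pvCnt13_snoc (gs : List Int) (g : Int) :
    pvCnt13 (gs ++ [g]) = pvCnt13 gs + (if 1 ≤ g ∧ g ≤ 3 then 1 else 0) := by
  unfold pvCnt13
  by_cases h1 : 1 ≤ g <;> by_cases h2 : g ≤ 3 <;>
    simp [List.filter_append, h1, h2]

theorem pvAStep_false (og fc ic : Int) (h : 0 ≤ og) :
    pvAStep (og, fc, ic) false =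
      (0, fc + (if og > 5 then og - 5 else 0) + 1, ic + (if 1 ≤ og ∧ og ≤ 3 then 1 else 0)) := by
  simp only [pvAStep, Bool.not_false, if_true, Bool.false_eq_true, if_false]
  by_cases hp : og > 0
  · rw [if_pos hp]
    rw [Prod.mk.injEq, Prod.mk.injEq]
    refine ⟨rfl, rfl, ?_⟩
    by_cases h3 : og ≤ 3
    · simp [h3, show (1:Int) ≤ og by omega]
    · simp [h3]
  · rw [if_neg hp]
    have h0 : og = 0 := by omega
    subst h0
    norm_num

-- A's loop, characterised by the zero positions of the processed prefix
theorem pvAloop (l : List Bool) :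
    l.foldl pvAStep (0, 0, 0) =
      ((l.length : Int) - pvBLastZero l - 1,
       ((pvZeros l).length : Int) + pvExcessSum (pvGapsAux (-1) (pvZeros l)),
       pvCnt13 (pvGapsAux (-1) (pvZeros l))) := by
  induction l using List.reverseRecOn with
  | nil => decide
  | append_singleton l x ih =>
    rw [List.foldl_append, ih]
    cases x with
    | true =>
      rw [pvZeros_snoc, pvBLastZero_snoc_true]
      simp only [if_true, List.append_nil]
      have hstep : ∀ s : Int × Int × Int, pvAStep s true = (s.1 + 1, s.2.1, s.2.2) := by
        intro s; simp [pvAStep]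
      simp only [List.foldl_cons, List.foldl_nil, hstep]
      rw [Prod.mk.injEq, Prod.mk.injEq]
      refine ⟨?_, rfl, rfl⟩
      simp only [List.length_append, List.length_cons, List.length_nil]
      push_cast; ring
    | false =>
      obtain ⟨hb1, hb2⟩ := pvBLastZero_bounds l
      set og : Int := (l.length : Int) - pvBLastZero l - 1 with hog
      have hog0 : 0 ≤ og := by rw [hog]; omega
      rw [pvZeros_snoc, pvBLastZero_snoc_false]
      simp only [Bool.false_eq_true, if_false]
      rw [pvGapsAux_snoc, pvZerosLast]
      have hgap : (l.length : Int) - pvBLastZero l - 1 = og := rfl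
      rw [pvExcessSum_snoc, pvCnt13_snoc, hgap]
      simp only [List.foldl_cons, List.foldl_nil, pvAStep_false og _ _ hog0]
      rw [Prod.mk.injEq, Prod.mk.injEq]
      refine ⟨?_, ?_, rfl⟩
      · simp only [List.length_append, List.length_cons, List.length_nil]
        push_cast; ring
      · simp only [List.length_append, List.length_cons, List.length_nil]
        push_cast; ring

-- decomposition of a list around its last False
theorem pvDecomp (ks : List Bool) :
    (ks.all id = true ∧ pvBLastZero ks = -1) ∨
    (∃ q m, ks = (q ++ [false]) ++ m ∧ m.all id = true ∧ pvBLastZero ks = (q.length : Int)) := by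
  induction ks using List.reverseRecOn with
  | nil => left; exact ⟨rfl, rfl⟩
  | append_singleton l x ih =>
    cases x with
    | false =>
      right
      exact ⟨l, [], by simp, rfl, by rw [pvBLastZero_snoc_false]⟩
    | true =>
      rcases ih with ⟨hall, hlz⟩ | ⟨q, m, hksm, hall, hlz⟩
      · left
        constructor
        · simp_all
        · rw [pvBLastZero_snoc_true]; exact hlz
      · right
        refine ⟨q, m ++ [true], by rw [hksm]; simp, by simp_all, ?_⟩
        rw [pvBLastZero_snoc_true]; exact hlz

theorem pvEnumFilter_allTrue (m : List Bool) : ∀ n : Int, m.all id = true →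
    (PySem.List.enumerate m n).filter (fun p => !p.2) = [] := by
  induction m with
  | nil => intro n _; rfl
  | cons v t ih =>
    intro n h
    simp only [List.all_cons, Bool.and_eq_true, id] at h
    rw [PySem.List.enumerate_cons]
    simp [List.filter, h.1, ih (n + 1) h.2]

theorem pvZeros_append_allTrue (l m : List Bool) (h : m.all id = true) :
    pvZeros (l ++ m) = pvZeros l := by
  unfold pvZeros
  rw [PySem.List.enumerate_append, List.filter_append, pvEnumFilter_allTrue m _ h]
  simp

theorem pvZeros_allTrue (m : List Bool) (h : m.all id = true) : pvZeros m = [] := by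
  have := pvZeros_append_allTrue [] m h
  simpa using this

theorem pvCore_eq (ks : List Bool) : pvACore ks = pvBCore ks := by
  unfold pvACore pvBCore
  dsimp only
  rw [pvALastZero_eq]
  rcases pvDecomp ks with ⟨hall, hlz⟩ | ⟨q, m, hksm, hall, hlz⟩
  · -- no zeros: prefix is empty, zeros list is empty
    rw [hlz]
    have hz : pvZeros ks = [] := pvZeros_allTrue ks hall
    rw [hz]
    have hslice : PySem.List.slice ks (some 0) (some ((-1 : Int) + 1)) = [] := by
      have h0 : ((-1 : Int) + 1) = ((0 : Nat) : Int) := by norm_num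
      rw [h0, PySem.List.slice_zero_start, PySem.List.slice_to_natCast]
      simp
    rw [hslice]
    simp only [List.foldl_nil, List.getLast?_nil]
    norm_num
  · -- last zero at index q.length; prefix is q ++ [false], suffix m is all ones
    rw [hlz]
    have hzeq : pvZeros ks = pvZeros (q ++ [false]) := by
      rw [hksm]; exact pvZeros_append_allTrue _ m hall
    have hlast : (pvZeros (q ++ [false])).getLast?.getD (-1) = (q.length : Int) := by
      rw [pvZerosLast, pvBLastZero_snoc_false]
    obtain ⟨lz, hsome, hlzv⟩ : ∃ lz, (pvZeros (q ++ [false])).getLast? = some lz ∧ lz = (q.length : Int) := by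
      cases hc : (pvZeros (q ++ [false])).getLast? with
      | none => rw [hc] at hlast; simp only [Option.getD_none] at hlast; omega
      | some a => rw [hc] at hlast; simp at hlast; exact ⟨a, rfl, hlast⟩
    have hslice : PySem.List.slice ks (some 0) (some ((q.length : Int) + 1)) = q ++ [false] := by
      rw [hksm]
      have h1 : ((q.length : Int) + 1) = (((q ++ [false]).length : Nat) : Int) := by simp
      rw [h1, PySem.List.slice_zero_start, PySem.List.slice_to_natCast]
      exact List.take_left' rfl
    rw [hslice, pvAloop (q ++ [false]), pvBLastZero_snoc_false, hzeq, hsome, hlzv]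
    rw [pvGaps_def]
    have hlen : (ks.length : Int) = (q.length : Int) + 1 + (m.length : Int) := by
      rw [hksm]; push_cast; simp; ring
    simp only []
    have htrail : ((q ++ [false]).length : Int) - (q.length : Int) - 1 = 0 := by simp
    rw [htrail]
    have htr2 : (ks.length : Int) - ((q.length : Int) + 1) = (ks.length : Int) - 1 - (q.length : Int) := by ring
    rw [htr2]

-- ===== VERDICT (by name: the statement is the Claim_ definition above) =====
theorem can_make_enough_ancilla_py_spec : Claim_equal_can_make_enough_ancilla_py := by
  intro k ci ca _ _
  unfold Spec_can_make_enough_ancilla_py can_make_enough_ancilla_py can_make_enough_ancilla_py_alt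
  split
  · rfl
  · exact pvCore_eq _
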